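-- pv_equiv track=rewrite | github.com/djc-jpg/xh-helper | apps/api/app/services/assistant_experience_service.py | _conversation_title
-- ===== SOURCE A (Python) =====
-- from typing import Any
--
-- def _trim_text(value: Any, max_len: int = 96) -> str | None:
--     text = str(value or "").strip()
--     if not text:
--         return None
--     collapsed = " ".join(text.split())
--     if len(collapsed) <= max_len:
--         return collapsed
--     return f"{collapsed[: max_len - 3]}..."
--
-- def _conversation_title(
--     explicit_title: str | None,
--     history: list[dict[str, Any]],
--     last_user: str | None,
--     last_assistant: str | None,
-- ) -> str:
--     persisted = _trim_text(explicit_title, 34)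
--     if persisted:
--         return persisted
--     preferred = _trim_text(last_user, 34)
--     if preferred:
--         return preferred
--     for item in history:
--         if str(item.get("role") or "") == "user":
--             candidate = _trim_text(item.get("message"), 34)
--             if candidate:
--                 return candidate
--     fallback = _trim_text(last_assistant, 34)
--     return fallback or "新对话"
-- ===== SOURCE B (Python) =====
-- def _trim_text(value, max_len=96):
--     text = str(value or "").strip()
--     if not text:
--         return None
--     collapsed = " ".join(text.split())
--     if len(collapsed) <= max_len:
--         return collapsed
--     return f"{collapsed[: max_len - 3]}..."
--
-- def _conversation_title(explicit_title, history, last_user, last_assistant):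
--     # Accumulate in REVERSE priority order: start from the weakest fallback and
--     # let each stronger source overwrite the accumulator; the last write wins.
--     title = _trim_text(last_assistant, 34) or "新对话"
--     for item in reversed(history):
--         if str(item.get("role") or "") == "user":
--             t = _trim_text(item.get("message"), 34)
--             if t:
--                 title = t
--     for source in (last_user, explicit_title):
--         t = _trim_text(source, 34)
--         if t:
--             title = t
--     return title
-- ===== Notes on version B (the rewrite author's own statement) =====
-- stated objective: alternative
-- what changed: Replaces A's forward early-exit priority chain by a back-to-front overwrite accumulation: start from the weakest fallback, scan history in reverse letting earlier user messages overwrite, then let last_user and explicit_title overwrite in turn; no early returns.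
import Mathlib
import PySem

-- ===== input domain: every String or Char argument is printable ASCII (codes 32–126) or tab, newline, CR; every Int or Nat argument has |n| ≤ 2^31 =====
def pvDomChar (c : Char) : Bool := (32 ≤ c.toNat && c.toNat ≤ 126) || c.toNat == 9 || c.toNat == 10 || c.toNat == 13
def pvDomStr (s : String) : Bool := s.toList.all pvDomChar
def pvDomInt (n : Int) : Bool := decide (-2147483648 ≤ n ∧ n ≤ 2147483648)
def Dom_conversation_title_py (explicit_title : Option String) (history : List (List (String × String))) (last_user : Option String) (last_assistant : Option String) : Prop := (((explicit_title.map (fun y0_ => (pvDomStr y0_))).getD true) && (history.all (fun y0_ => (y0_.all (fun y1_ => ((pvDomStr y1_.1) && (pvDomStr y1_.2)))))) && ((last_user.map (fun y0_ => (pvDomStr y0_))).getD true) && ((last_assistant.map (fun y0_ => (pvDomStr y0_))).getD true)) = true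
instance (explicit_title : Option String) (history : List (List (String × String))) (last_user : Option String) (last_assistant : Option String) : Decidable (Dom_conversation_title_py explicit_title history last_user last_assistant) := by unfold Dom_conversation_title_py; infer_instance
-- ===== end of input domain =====

-- B replaces A's forward early-exit priority chain by a back-to-front overwrite
-- accumulation (weakest fallback first, stronger sources overwrite); objective:
-- alternative (same cost).

-- ===== PORT A =====
-- shared module helper: dict.get(k) on an association list — first match, as Python dicts
def pyGetKV (d : List (String × String)) (k : String) : Option String :=
  (d.find? (fun p => p.1 == k)).map (·.2)

-- module helper _trim_text, used verbatim by both A and B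
def trimText (value : Option String) (maxLen : Int) : Option String :=
  let text := PySem.Str.strip (value.getD "")   -- str(value or "").strip()
  if text = "" then none
  else
    let collapsed := PySem.Str.join " " (PySem.Str.split₀ text)
    if PySem.Str.len collapsed ≤ maxLen then some collapsed
    else some (PySem.Str.slice collapsed none (some (maxLen - 3)) ++ "...")

-- A's for-loop over history (forward, early exit on first hit)
def titleLoopA (history : List (List (String × String))) : Option String :=
  match history with
  | [] => none
  | item :: rest =>
    if (pyGetKV item "role").getD "" = "user" then
      match trimText (pyGetKV item "message") 34 with
      | some c => some c
      | none => titleLoopA rest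
    else titleLoopA rest

def conversation_title_py (explicit_title : Option String) (history : List (List (String × String))) (last_user : Option String) (last_assistant : Option String) : String :=
  match trimText explicit_title 34 with
  | some persisted => persisted
  | none =>
    match trimText last_user 34 with
    | some preferred => preferred
    | none =>
      match titleLoopA history with
      | some candidate => candidate
      | none => (trimText last_assistant 34).getD "新对话"

-- ===== PORT B =====
-- one overwrite step for a history item: a trimmed user message replaces the accumulator
def stepB (acc : String) (item : List (String × String)) : String :=
  if (pyGetKV item "role").getD "" = "user" then
    match trimText (pyGetKV item "message") 34 with
    | some t => t
    | none => acc
  else acc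

def conversation_title_py_alt (explicit_title : Option String) (history : List (List (String × String))) (last_user : Option String) (last_assistant : Option String) : String :=
  let base := (trimText last_assistant 34).getD "新对话"
  let afterHist := history.reverse.foldl stepB base
  [last_user, explicit_title].foldl
    (fun acc src =>
      match trimText src 34 with
      | some t => t
      | none => acc) afterHist

-- ===== PRECONDITION & SPEC =====
def Spec_conversation_title_py (explicit_title : Option String) (history : List (List (String × String))) (last_user : Option String) (last_assistant : Option String) (out : String) : Prop := out = conversation_title_py_alt explicit_title history last_user last_assistant
instance (explicit_title : Option String) (history : List (List (String × String))) (last_user : Option String) (last_assistant : Option String) (out : String) : Decidable (Spec_conversation_title_py explicit_title history last_user last_assistant out) := by unfold Spec_conversation_title_py; infer_instance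

-- ===== CLAIM (what is proved, stated in full; the proofs are below) =====
def Claim_equal_conversation_title_py : Prop := ∀ (explicit_title : Option String) (history : List (List (String × String))) (last_user : Option String) (last_assistant : Option String), Dom_conversation_title_py explicit_title history last_user last_assistant → Spec_conversation_title_py explicit_title history last_user last_assistant (conversation_title_py explicit_title history last_user last_assistant)

-- ===== LEMMAS AND PROOFS =====

-- back-to-front overwrite fold = forward early-exit search, with the accumulator as default
theorem foldl_reverse_eq_titleLoopA (history : List (List (String × String))) (acc : String) :
    history.reverse.foldl stepB acc = (titleLoopA history).getD acc := by
  induction history generalizing acc with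
  | nil => rfl
  | cons item rest ih =>
    simp only [List.reverse_cons, List.foldl_append, List.foldl_cons, List.foldl_nil, ih]
    by_cases h : (pyGetKV item "role").getD "" = "user"
    · simp only [titleLoopA, h, if_pos, stepB]
      cases trimText (pyGetKV item "message") 34 <;> simp
    · simp [titleLoopA, h, stepB]

-- ===== VERDICT (by name: the statement is the Claim_ definition above) =====
theorem conversation_title_py_spec : Claim_equal_conversation_title_py := by
  intro e history u a _
  unfold Spec_conversation_title_py conversation_title_py conversation_title_py_alt
  simp only [List.foldl_cons, List.foldl_nil, foldl_reverse_eq_titleLoopA]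
  cases trimText e 34 <;> cases trimText u 34 <;>
    cases titleLoopA history <;> simp
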